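-- pv_equiv track=rewrite | github.com/jjkool1214/wordle_python | wordle.py | check_dupes
-- ===== SOURCE A (Python) =====
-- def check_dupes(word):
--     for i in range(5):
--         letter = word[i]
--         count = 0
--         for j in range(5):
--             if letter == word[j]:
--                 count += 1
--         if count > 1:
--             return word[i]
--     return None
-- ===== SOURCE B (Python) =====
-- def check_dupes(word):
--     dups = [i for i in range(5) for j in range(i + 1, 5) if word[i] == word[j]]
--     if dups:
--         return word[min(dups)]
--     return None
-- ===== Notes on version B (the rewrite author's own statement) =====
-- stated objective: alternative
-- what changed: B enumerates unordered index pairs (i<j) of the first five positions, collects i for every equal pair, and returns the letter at the minimum collected index, replacing A's per-position occurrence counting with early return.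
import Mathlib
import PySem

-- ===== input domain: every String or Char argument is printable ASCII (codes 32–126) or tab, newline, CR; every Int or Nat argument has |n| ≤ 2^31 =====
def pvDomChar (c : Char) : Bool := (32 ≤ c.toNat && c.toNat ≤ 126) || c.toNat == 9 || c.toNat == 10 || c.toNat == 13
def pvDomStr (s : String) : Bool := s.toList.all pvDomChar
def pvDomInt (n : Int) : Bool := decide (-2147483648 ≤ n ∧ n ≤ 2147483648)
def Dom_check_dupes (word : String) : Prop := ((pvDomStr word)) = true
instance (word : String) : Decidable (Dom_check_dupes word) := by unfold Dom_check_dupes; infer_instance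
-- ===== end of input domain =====

-- B replaces A's per-position occurrence count with early return by collecting i over all
-- equal index pairs i < j of the first five positions and indexing the word once at the
-- minimum collected index (objective: alternative).

-- ===== PORT A =====
-- inner loop: count = 0; for j in range(5): if letter == word[j]: count += 1
def pvCountA (word : String) (letter : Char) : Int :=
  (PySem.List.pyRange 0 5 1).foldl (fun count j =>
    match PySem.Str.pyGet? word j with
    | some ch => if letter == ch then count + 1 else count
    | none => count) 0   -- none = IndexError in Python; Pre_ excludes it

-- outer loop with early return
def pvGoA (word : String) : List Int → Option String
  | [] => none
  | i :: rest =>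
    match PySem.Str.pyGet? word i with
    | none => none   -- IndexError; outside Pre_
    | some letter =>
      if pvCountA word letter > 1 then some letter.toString else pvGoA word rest

def check_dupes (word : String) : Option String :=
  pvGoA word (PySem.List.pyRange 0 5 1)

-- ===== PORT B =====
-- the comprehension's test word[i] == word[j]; false on an out-of-range index, where
-- Python raises IndexError (outside Pre_)
def pvEq (word : String) (i j : Int) : Bool :=
  match PySem.Str.pyGet? word i, PySem.Str.pyGet? word j with
  | some ci, some cj => ci == cj
  | _, _ => false

-- dups = [i for i in range(5) for j in range(i + 1, 5) if word[i] == word[j]]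
def pvDups (word : String) : List Int :=
  (PySem.List.pyRange 0 5 1).foldl (fun acc i =>
    (PySem.List.pyRange (i + 1) 5 1).foldl (fun acc2 j =>
      if pvEq word i j then acc2 ++ [i] else acc2) acc) []

-- if dups: return word[min(dups)]  /  return None
def check_dupes_alt (word : String) : Option String :=
  match PySem.List.min? (pvDups word) (fun x => x) with
  | some m => (PySem.Str.pyGet? word m).map (fun ch => ch.toString)
  | none => none

-- ===== PRECONDITION & SPEC =====
-- A indexes word[0..4], so it raises IndexError on words shorter than 5 characters.
def Pre_check_dupes (word : String) : Prop := 5 ≤ word.toList.length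
instance (word : String) : Decidable (Pre_check_dupes word) := by unfold Pre_check_dupes; infer_instance
def pvWitness_check_dupes : String := "abbey"

def Spec_check_dupes (word : String) (out : Option String) : Prop := out = check_dupes_alt word
instance (word : String) (out : Option String) : Decidable (Spec_check_dupes word out) := by unfold Spec_check_dupes; infer_instance

-- ===== CLAIM (what is proved, stated in full; the proofs are below) =====
def Claim_equal_check_dupes : Prop := ∀ (word : String), Dom_check_dupes word → Pre_check_dupes word → Spec_check_dupes word (check_dupes word)

-- ===== LEMMAS AND PROOFS =====

-- min(dups) is `some k` as soon as k is a member and a lower bound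
theorem pv_min_eq (l : List Int) (k : Int) (hk : k ∈ l) (hb : ∀ x ∈ l, k ≤ x) :
    PySem.List.min? l (fun x => x) = some k := by
  cases hm : PySem.List.min? l (fun x => x) with
  | none =>
    rw [PySem.List.min?_eq_none_iff] at hm
    simp [hm] at hk
  | some m =>
    have h1 : m ≤ k := PySem.List.min?_isMin hm k hk
    have h2 : k ≤ m := hb m (PySem.List.min?_mem hm)
    rw [le_antisymm h1 h2]

theorem pv_mem_chunk {l : List Int} {p : Int → Bool} {i m : Int} :
    (m ∈ (l.filter p).map (fun _ => i)) ↔ (m = i ∧ ∃ j ∈ l, p j = true) := by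
  constructor
  · intro hm
    obtain ⟨x, hx, hxm⟩ := List.mem_map.mp hm
    exact ⟨hxm.symm, x, (List.mem_filter.mp hx).1, (List.mem_filter.mp hx).2⟩
  · rintro ⟨rfl, j, hj, hpj⟩
    exact List.mem_map.mpr ⟨j, List.mem_filter.mpr ⟨hj, hpj⟩, rfl⟩

set_option maxHeartbeats 2000000 in
theorem pv_main (a b c d e : Char) (t : List Char) (word : String)
    (h : word.toList = a :: b :: c :: d :: e :: t) :
    check_dupes word = check_dupes_alt word := by
  have g0 : PySem.Str.pyGet? word 0 = some a := by simp [pysem, h]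
  have g1 : PySem.Str.pyGet? word 1 = some b := by simp [pysem, h]
  have g2 : PySem.Str.pyGet? word 2 = some c := by simp [pysem, h]
  have g3 : PySem.Str.pyGet? word 3 = some d := by simp [pysem, h]
  have g4 : PySem.Str.pyGet? word 4 = some e := by simp [pysem, h]
  have hR : PySem.List.pyRange 0 5 1 = [0, 1, 2, 3, 4] := by decide
  have hR1 : PySem.List.pyRange (0 + 1) 5 1 = [1, 2, 3, 4] := by decide
  have hR2 : PySem.List.pyRange (1 + 1) 5 1 = [2, 3, 4] := by decide
  have hR3 : PySem.List.pyRange (2 + 1) 5 1 = [3, 4] := by decide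
  have hR4 : PySem.List.pyRange (3 + 1) 5 1 = [4] := by decide
  have hR5 : PySem.List.pyRange (4 + 1) 5 1 = [] := by decide
  have hq01 : pvEq word 0 1 = (a == b) := by simp [pvEq, pysem, h]
  have hq02 : pvEq word 0 2 = (a == c) := by simp [pvEq, pysem, h]
  have hq03 : pvEq word 0 3 = (a == d) := by simp [pvEq, pysem, h]
  have hq04 : pvEq word 0 4 = (a == e) := by simp [pvEq, pysem, h]
  have hq12 : pvEq word 1 2 = (b == c) := by simp [pvEq, pysem, h]
  have hq13 : pvEq word 1 3 = (b == d) := by simp [pvEq, pysem, h]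
  have hq14 : pvEq word 1 4 = (b == e) := by simp [pvEq, pysem, h]
  have hq23 : pvEq word 2 3 = (c == d) := by simp [pvEq, pysem, h]
  have hq24 : pvEq word 2 4 = (c == e) := by simp [pvEq, pysem, h]
  have hq34 : pvEq word 3 4 = (d == e) := by simp [pvEq, pysem, h]
  -- membership in B's collected list, at the level of the five characters
  have hMem : ∀ m : Int, m ∈ pvDups word ↔
      ((m = 0 ∧ (a = b ∨ a = c ∨ a = d ∨ a = e)) ∨
       (m = 1 ∧ (b = c ∨ b = d ∨ b = e)) ∨
       (m = 2 ∧ (c = d ∨ c = e)) ∨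
       (m = 3 ∧ d = e)) := by
    intro m
    simp only [pvDups, PySem.List.foldl_append_if, PySem.List.foldl_append_eq_flatMap,
      hR, hR1, hR2, hR3, hR4, hR5, List.flatMap_cons, List.flatMap_nil,
      List.nil_append, List.append_nil, List.mem_append, pv_mem_chunk]
    simp only [List.mem_cons, List.not_mem_nil, or_false, exists_eq_or_imp, exists_eq_left,
      hq01, hq02, hq03, hq04, hq12, hq13, hq14, hq23, hq24, hq34, beq_iff_eq]
    tauto
  -- A's outer loop, unrolled
  have hA : check_dupes word =
      (if pvCountA word a > 1 then some a.toString else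
       if pvCountA word b > 1 then some b.toString else
       if pvCountA word c > 1 then some c.toString else
       if pvCountA word d > 1 then some d.toString else
       if pvCountA word e > 1 then some e.toString else none) := by
    simp only [check_dupes, hR, pvGoA, g0, g1, g2, g3, g4]
  -- A's counts, as the number of equal letters among the five
  have hc0 : pvCountA word a = 1 + (if a = b then 1 else 0) + (if a = c then 1 else 0)
      + (if a = d then 1 else 0) + (if a = e then 1 else 0) := by
    simp only [pvCountA, hR, List.foldl_cons, List.foldl_nil, g0, g1, g2, g3, g4,
      beq_iff_eq, eq_self_iff_true, if_true]
    split_ifs <;> omega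
  have hc1 : pvCountA word b = 1 + (if b = a then 1 else 0) + (if b = c then 1 else 0)
      + (if b = d then 1 else 0) + (if b = e then 1 else 0) := by
    simp only [pvCountA, hR, List.foldl_cons, List.foldl_nil, g0, g1, g2, g3, g4,
      beq_iff_eq, eq_self_iff_true, if_true]
    split_ifs <;> omega
  have hc2 : pvCountA word c = 1 + (if c = a then 1 else 0) + (if c = b then 1 else 0)
      + (if c = d then 1 else 0) + (if c = e then 1 else 0) := by
    simp only [pvCountA, hR, List.foldl_cons, List.foldl_nil, g0, g1, g2, g3, g4,
      beq_iff_eq, eq_self_iff_true, if_true]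
    split_ifs <;> omega
  have hc3 : pvCountA word d = 1 + (if d = a then 1 else 0) + (if d = b then 1 else 0)
      + (if d = c then 1 else 0) + (if d = e then 1 else 0) := by
    simp only [pvCountA, hR, List.foldl_cons, List.foldl_nil, g0, g1, g2, g3, g4,
      beq_iff_eq, eq_self_iff_true, if_true]
    split_ifs <;> omega
  have hc4 : pvCountA word e = 1 + (if e = a then 1 else 0) + (if e = b then 1 else 0)
      + (if e = c then 1 else 0) + (if e = d then 1 else 0) := by
    simp only [pvCountA, hR, List.foldl_cons, List.foldl_nil, g0, g1, g2, g3, g4,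
      beq_iff_eq, eq_self_iff_true, if_true]
    split_ifs <;> omega
  rw [hA]
  unfold check_dupes_alt
  by_cases q0 : a = b ∨ a = c ∨ a = d ∨ a = e
  · have hmin : PySem.List.min? (pvDups word) (fun x => x) = some 0 := by
      apply pv_min_eq
      · exact (hMem 0).mpr (Or.inl ⟨rfl, q0⟩)
      · intro x hx
        rcases (hMem x).mp hx with ⟨hm, _⟩ | ⟨hm, _⟩ | ⟨hm, _⟩ | ⟨hm, _⟩ <;> omega
    rw [hmin]
    have : pvCountA word a > 1 := by rw [hc0]; rcases q0 with h' | h' | h' | h' <;> simp [h'] <;> split_ifs <;> omega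
    rw [if_pos this]
    simp [pysem, h]
  · push_neg at q0
    obtain ⟨n01, n02, n03, n04⟩ := q0
    have ha : ¬ pvCountA word a > 1 := by rw [hc0]; simp [n01, n02, n03, n04]
    rw [if_neg ha]
    by_cases q1 : b = c ∨ b = d ∨ b = e
    · have hmin : PySem.List.min? (pvDups word) (fun x => x) = some 1 := by
        apply pv_min_eq
        · exact (hMem 1).mpr (Or.inr (Or.inl ⟨rfl, q1⟩))
        · intro x hx
          rcases (hMem x).mp hx with ⟨hm, hd⟩ | ⟨hm, _⟩ | ⟨hm, _⟩ | ⟨hm, _⟩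
          · rcases hd with h' | h' | h' | h' <;> exact absurd h' (by assumption)
          all_goals omega
      rw [hmin]
      have : pvCountA word b > 1 := by rw [hc1]; rcases q1 with h' | h' | h' <;> simp [h'] <;> split_ifs <;> omega
      rw [if_pos this]
      simp [pysem, h]
    · push_neg at q1
      obtain ⟨n12, n13, n14⟩ := q1
      have hb : ¬ pvCountA word b > 1 := by rw [hc1]; simp [Ne.symm n01, n12, n13, n14]
      rw [if_neg hb]
      by_cases q2 : c = d ∨ c = e
      · have hmin : PySem.List.min? (pvDups word) (fun x => x) = some 2 := by
          apply pv_min_eq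
          · exact (hMem 2).mpr (Or.inr (Or.inr (Or.inl ⟨rfl, q2⟩)))
          · intro x hx
            rcases (hMem x).mp hx with ⟨hm, hd⟩ | ⟨hm, hd⟩ | ⟨hm, _⟩ | ⟨hm, _⟩
            · rcases hd with h' | h' | h' | h' <;> exact absurd h' (by assumption)
            · rcases hd with h' | h' | h' <;> exact absurd h' (by assumption)
            all_goals omega
        rw [hmin]
        have : pvCountA word c > 1 := by rw [hc2]; rcases q2 with h' | h' <;> simp [h'] <;> split_ifs <;> omega
        rw [if_pos this]
        simp [pysem, h]
      · push_neg at q2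
        obtain ⟨n23, n24⟩ := q2
        have hcn : ¬ pvCountA word c > 1 := by rw [hc2]; simp [Ne.symm n02, Ne.symm n12, n23, n24]
        rw [if_neg hcn]
        by_cases q3 : d = e
        · have hmin : PySem.List.min? (pvDups word) (fun x => x) = some 3 := by
            apply pv_min_eq
            · exact (hMem 3).mpr (Or.inr (Or.inr (Or.inr ⟨rfl, q3⟩)))
            · intro x hx
              rcases (hMem x).mp hx with ⟨hm, hd⟩ | ⟨hm, hd⟩ | ⟨hm, hd⟩ | ⟨hm, _⟩
              · rcases hd with h' | h' | h' | h' <;> exact absurd h' (by assumption)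
              · rcases hd with h' | h' | h' <;> exact absurd h' (by assumption)
              · rcases hd with h' | h' <;> exact absurd h' (by assumption)
              all_goals omega
          rw [hmin]
          have : pvCountA word d > 1 := by rw [hc3]; simp [q3] <;> split_ifs <;> omega
          rw [if_pos this]
          simp [pysem, h]
        · have hdn : ¬ pvCountA word d > 1 := by rw [hc3]; simp [Ne.symm n03, Ne.symm n13, Ne.symm n23, q3]
          rw [if_neg hdn]
          have hen : ¬ pvCountA word e > 1 := by rw [hc4]; simp [Ne.symm n04, Ne.symm n14, Ne.symm n24, Ne.symm q3]
          rw [if_neg hen]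
          have hnil : pvDups word = [] := by
            rw [List.eq_nil_iff_forall_not_mem]
            intro x hx
            rcases (hMem x).mp hx with ⟨_, hd⟩ | ⟨_, hd⟩ | ⟨_, hd⟩ | ⟨_, hd⟩
            · rcases hd with h' | h' | h' | h' <;> exact absurd h' (by assumption)
            · rcases hd with h' | h' | h' <;> exact absurd h' (by assumption)
            · rcases hd with h' | h' <;> exact absurd h' (by assumption)
            · exact absurd hd q3
          rw [hnil]
          simp [PySem.List.min?]

-- ===== VERDICT (by name: the statement is the Claim_ definition above) =====
theorem check_dupes_spec : Claim_equal_check_dupes := by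
  intro word _ hpre
  unfold Spec_check_dupes
  unfold Pre_check_dupes at hpre
  match hh : word.toList with
  | a :: b :: c :: d :: e :: t => exact pv_main a b c d e t word hh
  | [] | [_] | [_, _] | [_, _, _] | [_, _, _, _] => simp [hh] at hpre
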